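-- pv_equiv track=rewrite | github.com/stefantaubert/tacotron2 | src/core/pre/merge_ds.py | expand_speakers
-- ===== SOURCE A (Python) =====
-- from typing import Dict, List, Optional, OrderedDict, Set, Tuple
--
-- def expand_speakers(speakers_dict: OrderedDict[str, List[str]], ds_speakers: List[Tuple[str, str]]) -> List[Tuple[str, str]]:
--   # expand all
--   expanded_speakers: List[Tuple[str, str]] = []
--   for ds_name, speaker_name in ds_speakers:
--     if ds_name not in speakers_dict:
--       continue
--     if speaker_name == 'all':
--       expanded_speakers.extend([(ds_name, speaker) for speaker in speakers_dict[ds_name]])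
--     else:
--       if speaker_name not in speakers_dict[ds_name]:
--         continue
--       expanded_speakers.append((ds_name, speaker_name))
--   expanded_speakers = list(sorted(set(expanded_speakers)))
--   return expanded_speakers
-- ===== SOURCE B (Python) =====
-- def expand_speakers(speakers_dict, ds_speakers):
--   wants_all = {d for d, s in ds_speakers if s == 'all'}
--   requested = {(d, s) for d, s in ds_speakers if s != 'all'}
--   found = {(d, s)
--            for d, speakers in speakers_dict.items()
--            for s in speakers
--            if d in wants_all or (d, s) in requested}
--   return sorted(found)
-- ===== Notes on version B (the rewrite author's own statement) =====
-- stated objective: alternative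
-- what changed: Instead of scanning the request list with per-request membership scans of the speaker lists, B prebuilds two sets from the requests ('all'-datasets and specific (dataset,speaker) pairs) and drives one pass over the speakers dict, emitting each listed speaker whose dataset wants all or whose pair was requested, then sorts the deduplicated set.
import Mathlib
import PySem

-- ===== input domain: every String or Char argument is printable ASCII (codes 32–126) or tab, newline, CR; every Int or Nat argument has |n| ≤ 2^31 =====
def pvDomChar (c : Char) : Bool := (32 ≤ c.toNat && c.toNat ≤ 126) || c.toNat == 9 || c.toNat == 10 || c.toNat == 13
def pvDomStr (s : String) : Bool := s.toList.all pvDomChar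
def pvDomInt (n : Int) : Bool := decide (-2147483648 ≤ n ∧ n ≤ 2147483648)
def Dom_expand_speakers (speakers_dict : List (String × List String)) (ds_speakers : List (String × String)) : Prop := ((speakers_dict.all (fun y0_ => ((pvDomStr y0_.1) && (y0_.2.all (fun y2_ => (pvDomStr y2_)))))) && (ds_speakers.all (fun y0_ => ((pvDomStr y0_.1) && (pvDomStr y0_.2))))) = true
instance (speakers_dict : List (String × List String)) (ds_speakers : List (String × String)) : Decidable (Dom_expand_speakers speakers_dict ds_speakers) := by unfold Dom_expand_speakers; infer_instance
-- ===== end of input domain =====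

-- B drives one pass over the speakers dict with prebuilt request sets instead of scanning the request list with per-request speaker-list scans; equal return value proved.


-- ===== PORT A =====
def expand_speakers (speakers_dict : List (String × List String)) (ds_speakers : List (String × String)) : List (String × String) :=
  let d := PySem.Dict.ofList speakers_dict
  let expanded := ds_speakers.foldl (fun acc p =>
    if d.contains p.1 = false then acc
    else if p.2 == "all" then acc ++ (d.getD p.1 []).map (fun s => (p.1, s))
    else if (d.getD p.1 []).contains p.2 = false then acc
    else acc ++ [p]) []
  PySem.List.sorted2 (PySem.Set.ofList expanded) (fun x => x.1) (fun x => x.2) false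

-- ===== PORT B =====
def expand_speakers_alt (speakers_dict : List (String × List String)) (ds_speakers : List (String × String)) : List (String × String) :=
  let d := PySem.Dict.ofList speakers_dict
  let wantsAll := PySem.Set.ofList ((ds_speakers.filter (fun p => p.2 == "all")).map (fun p => p.1))
  let requested := PySem.Set.ofList (ds_speakers.filter (fun p => !(p.2 == "all")))
  let found := PySem.Set.ofList (d.items.flatMap (fun kv =>
      (kv.2.filter (fun s => PySem.Set.contains wantsAll kv.1 || PySem.Set.contains requested (kv.1, s))).map (fun s => (kv.1, s))))
  PySem.List.sorted2 found (fun x => x.1) (fun x => x.2) false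

-- ===== PRECONDITION & SPEC =====
def Spec_expand_speakers (speakers_dict : List (String × List String)) (ds_speakers : List (String × String)) (out : List (String × String)) : Prop := out = expand_speakers_alt speakers_dict ds_speakers
instance (speakers_dict : List (String × List String)) (ds_speakers : List (String × String)) (out : List (String × String)) : Decidable (Spec_expand_speakers speakers_dict ds_speakers out) := by unfold Spec_expand_speakers; infer_instance

-- ===== CLAIM (what is proved, stated in full; the proofs are below) =====
def Claim_equal_expand_speakers : Prop := ∀ (speakers_dict : List (String × List String)) (ds_speakers : List (String × String)), Dom_expand_speakers speakers_dict ds_speakers → Spec_expand_speakers speakers_dict ds_speakers (expand_speakers speakers_dict ds_speakers)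

-- ===== LEMMAS AND PROOFS =====

-- sorted2 with fst/snd keys is sorted with the lexicographic key toLex
theorem sorted2_eq_sorted_toLex (xs : List (String × String)) :
    PySem.List.sorted2 xs (fun x => x.1) (fun x => x.2) false
      = PySem.List.sorted xs (fun x => toLex x) false := by
  rw [PySem.List.sorted_eq_foldl_insertBy]
  have hbe : (fun (a b : String × String) =>
      (decide (a.1 < b.1) || (!decide (b.1 < a.1) && decide (a.2 < b.2))))
      = (fun (a b : String × String) => decide (toLex a < toLex b)) := by
    funext a b
    rcases lt_trichotomy a.1 b.1 with h | h | h
    · simp [h, Prod.Lex.lt_iff, asymm h]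
    · simp [h, Prod.Lex.lt_iff]
    · simp [h, Prod.Lex.lt_iff, asymm h, ne_of_gt h]
  show xs.foldl (fun acc x => PySem.List.insertBy (fun a b =>
      (decide (a.1 < b.1) || (!decide (b.1 < a.1) && decide (a.2 < b.2)))) x acc) [] = _
  rw [hbe]

-- the common membership characterisation
def pvMemP (d : PySem.Dict String (List String)) (ds : List (String × String)) (x : String × String) : Prop :=
  (d.contains x.1 = true ∧ x.2 ∈ d.getD x.1 []) ∧ ((x.1, "all") ∈ ds ∨ (x.1, x.2) ∈ ds)

-- the step-by-step contribution of one request, and the A-loop as a flatMap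
def pvG (d : PySem.Dict String (List String)) (p : String × String) : List (String × String) :=
  if d.contains p.1 = false then []
  else if p.2 == "all" then (d.getD p.1 []).map (fun s => (p.1, s))
  else if (d.getD p.1 []).contains p.2 = false then []
  else [p]

theorem foldl_pvG (d : PySem.Dict String (List String)) (l : List (String × String))
    (acc : List (String × String)) :
    l.foldl (fun acc p =>
      if d.contains p.1 = false then acc
      else if p.2 == "all" then acc ++ (d.getD p.1 []).map (fun s => (p.1, s))
      else if (d.getD p.1 []).contains p.2 = false then acc
      else acc ++ [p]) acc = acc ++ l.flatMap (pvG d) := by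
  induction l generalizing acc with
  | nil => simp
  | cons q t ih =>
    simp only [List.foldl_cons, List.flatMap_cons, ih]
    unfold pvG
    split_ifs <;> simp

theorem memA_iff (d : PySem.Dict String (List String)) (ds : List (String × String)) (x : String × String) :
    x ∈ ds.foldl (fun acc p =>
      if d.contains p.1 = false then acc
      else if p.2 == "all" then acc ++ (d.getD p.1 []).map (fun s => (p.1, s))
      else if (d.getD p.1 []).contains p.2 = false then acc
      else acc ++ [p]) []
    ↔ pvMemP d ds x := by
  rw [foldl_pvG, List.nil_append, List.mem_flatMap]
  unfold pvMemP
  constructor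
  · rintro ⟨p, hp, hx⟩
    unfold pvG at hx
    split_ifs at hx with h1 h2 h3
    · simp at hx
    · rcases List.mem_map.1 hx with ⟨s, hs, rfl⟩
      refine ⟨⟨by simpa using h1, hs⟩, Or.inl ?_⟩
      have h2' : p.2 = "all" := by simpa using h2
      have : p = (p.1, "all") := by rw [← h2']
      exact this ▸ hp
    · simp at hx
    · have hx' : x = p := by simpa using hx
      subst hx'
      have h3' : (d.getD x.1 []).contains x.2 = true := by
        cases hcc : (d.getD x.1 []).contains x.2
        · exact absurd hcc h3
        · rfl
      refine ⟨⟨by simpa using h1, by simpa using h3'⟩, Or.inr (by simpa using hp)⟩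
  · rintro ⟨⟨hc, hm⟩, hd⟩
    by_cases hall : (x.1, "all") ∈ ds
    · refine ⟨(x.1, "all"), hall, ?_⟩
      unfold pvG
      rw [if_neg (by simp [hc]), if_pos (by simp)]
      exact List.mem_map.2 ⟨x.2, hm, by simp⟩
    · rcases hd with h | h
      · exact absurd h hall
      · refine ⟨(x.1, x.2), h, ?_⟩
        have hne : x.2 ≠ "all" := fun he => hall (by rw [← he]; simpa using h)
        unfold pvG
        rw [if_neg (by simp [hc]), if_neg (by simp [hne]), if_neg (by simp [hm])]
        simp

theorem memB_iff (sd : List (String × List String)) (ds : List (String × String)) (x : String × String) :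
    x ∈ (PySem.Dict.ofList sd).items.flatMap (fun kv =>
      (kv.2.filter (fun s =>
        PySem.Set.contains (PySem.Set.ofList ((ds.filter (fun p => p.2 == "all")).map (fun p => p.1))) kv.1
        || PySem.Set.contains (PySem.Set.ofList (ds.filter (fun p => !(p.2 == "all")))) (kv.1, s))).map (fun s => (kv.1, s)))
    ↔ pvMemP (PySem.Dict.ofList sd) ds x := by
  have hnd := PySem.Dict.nodup_keys_ofList sd
  rw [List.mem_flatMap]
  unfold pvMemP
  constructor
  · rintro ⟨kv, hkv, hx⟩
    rcases List.mem_map.1 hx with ⟨s, hs, rfl⟩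
    rcases List.mem_filter.1 hs with ⟨hsmem, hcond⟩
    have hget : (PySem.Dict.ofList sd).get? kv.1 = some kv.2 :=
      PySem.Dict.get?_of_mem_items _ (by simpa using hkv) hnd
    have hcd : (PySem.Dict.ofList sd).contains kv.1 = true := by
      rw [PySem.Dict.contains_eq_isSome_get?, hget]; rfl
    have hgd : (PySem.Dict.ofList sd).getD kv.1 [] = kv.2 :=
      PySem.Dict.getD_of_get?_eq_some _ [] hget
    refine ⟨⟨hcd, by rw [hgd]; exact hsmem⟩, ?_⟩
    have hcond' : kv.1 ∈ PySem.Set.ofList ((ds.filter (fun p => p.2 == "all")).map (fun p => p.1))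
        ∨ (kv.1, s) ∈ PySem.Set.ofList (ds.filter (fun p => !(p.2 == "all"))) := by
      simpa [PySem.Set.contains] using hcond
    simp only [PySem.Set.mem_ofList] at hcond'
    rcases hcond' with h | h
    · rcases List.mem_map.1 h with ⟨p, hpf, hp1⟩
      rcases List.mem_filter.1 hpf with ⟨hpds, hpall⟩
      left
      have : p = (kv.1, "all") := by
        have h2 : p.2 = "all" := by simpa using hpall
        rw [← hp1, ← h2]
      exact this ▸ hpds
    · right
      exact (List.mem_filter.1 h).1
  · rintro ⟨⟨hc, hm⟩, hor⟩
    obtain ⟨v, hg⟩ : ∃ v, (PySem.Dict.ofList sd).get? x.1 = some v := by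
      cases hg : (PySem.Dict.ofList sd).get? x.1 with
      | none => rw [PySem.Dict.contains_eq_isSome_get?, hg] at hc; simp at hc
      | some v => exact ⟨v, rfl⟩
    have hgd : (PySem.Dict.ofList sd).getD x.1 [] = v :=
      PySem.Dict.getD_of_get?_eq_some _ [] hg
    refine ⟨(x.1, v), by simpa using PySem.Dict.mem_items_of_get?_eq_some _ hg, ?_⟩
    refine List.mem_map.2 ⟨x.2, List.mem_filter.2 ⟨by rw [← hgd]; exact hm, ?_⟩, by simp⟩
    by_cases hall : (x.1, "all") ∈ ds
    · have : x.1 ∈ (ds.filter (fun p => p.2 == "all")).map (fun p => p.1) :=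
        List.mem_map.2 ⟨(x.1, "all"), List.mem_filter.2 ⟨hall, by simp⟩, rfl⟩
      simp [PySem.Set.contains, PySem.Set.mem_ofList, this]
    · have hds : (x.1, x.2) ∈ ds := by
        rcases hor with h | h
        · exact absurd h hall
        · exact h
      have hne : x.2 ≠ "all" := fun he => hall (by rw [← he]; exact hds)
      have : (x.1, x.2) ∈ ds.filter (fun p => !(p.2 == "all")) :=
        List.mem_filter.2 ⟨hds, by simp [hne]⟩
      simp [PySem.Set.contains, PySem.Set.mem_ofList, this]

-- ===== VERDICT (by name: the statement is the Claim_ definition above) =====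
theorem expand_speakers_spec : Claim_equal_expand_speakers := by
  intro sd ds _
  unfold Spec_expand_speakers expand_speakers expand_speakers_alt
  simp only
  rw [sorted2_eq_sorted_toLex, sorted2_eq_sorted_toLex]
  apply PySem.List.sorted_eq_sorted_of_perm _ _ _ toLex.injective
  rw [List.perm_ext_iff_of_nodup (PySem.Set.nodup_ofList _) (PySem.Set.nodup_ofList _)]
  intro x
  rw [PySem.Set.mem_ofList, PySem.Set.mem_ofList, memA_iff, memB_iff]
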